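-- pv_equiv track=rewrite | github.com/zensgit/yuantus-plm | src/yuantus/meta_engine/web/eco_impact_apply_router.py | _normalize_relationship_props
-- ===== SOURCE A (Python) =====
-- from typing import Any, Dict, List, Optional
--
-- def _normalize_relationship_props(values: Optional[List[str]]) -> Optional[List[str]]:
--     if not values:
--         return None
--     flattened: List[str] = []
--     for raw in values:
--         if raw is None:
--             continue
--         for part in str(raw).split(","):
--             part = part.strip()
--             if part:
--                 flattened.append(part)
--     return flattened or None
-- ===== SOURCE B (Python) =====
-- from typing import List, Optional
--
-- def _normalize_relationship_props(values: Optional[List[str]]) -> Optional[List[str]]: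
--     if not values:
--         return None
--     out: List[str] = []
--     for raw in values:
--         if raw is None:
--             continue
--         tok = ""    # current token with leading whitespace already skipped
--         pend = ""   # whitespace seen since the last non-space char of tok
--         for ch in str(raw):
--             if ch == ",":
--                 if tok:
--                     out.append(tok)
--                 tok = ""
--                 pend = ""
--             elif ch.isspace():
--                 if tok:
--                     pend += ch
--             else:
--                 tok += pend + ch
--                 pend = ""
--         if tok:
--             out.append(tok)
--     return out or None
-- ===== Notes on version B (the rewrite author's own statement) =====
-- stated objective: alternative
-- what changed: Replaces the per-element split(',') plus per-part strip() of A with a single character-level state machine that builds each token incrementally, skipping leading whitespace and holding trailing whitespace in a pending buffer, emitting tokens at commas and string ends.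
import Mathlib
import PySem

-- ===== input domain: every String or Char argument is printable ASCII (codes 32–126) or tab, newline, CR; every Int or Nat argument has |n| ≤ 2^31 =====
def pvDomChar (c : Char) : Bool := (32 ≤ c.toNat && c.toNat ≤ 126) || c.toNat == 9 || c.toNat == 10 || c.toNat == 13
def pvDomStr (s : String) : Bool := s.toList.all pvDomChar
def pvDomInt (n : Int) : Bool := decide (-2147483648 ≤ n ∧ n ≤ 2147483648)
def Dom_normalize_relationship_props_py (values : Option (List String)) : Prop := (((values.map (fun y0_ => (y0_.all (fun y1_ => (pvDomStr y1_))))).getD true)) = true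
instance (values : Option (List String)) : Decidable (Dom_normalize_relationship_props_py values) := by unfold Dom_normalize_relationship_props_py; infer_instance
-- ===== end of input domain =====

-- B replaces A's per-element split(",") + per-part strip() with a single character-level
-- state machine building each token incrementally (objective: alternative, same cost).

-- ===== PORT A =====
-- literal port of A: for each raw, split on ",", strip each part, append non-empty parts
def normalize_relationship_props_py (values : Option (List String)) : Option (List String) :=
  match values with
  | none => none
  | some vs =>
    if vs = [] then none
    else
      let flattened : List String := vs.foldl (fun acc raw =>
        (PySem.Chars.splitOn raw.toList [',']).foldl (fun acc part =>
          let part := PySem.Chars.strip part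
          if !part.isEmpty then acc ++ [String.ofList part] else acc) acc) []
      if flattened = [] then none else some flattened

-- ===== PORT B =====
-- the loop body of B's inner char loop: state (out, tok, pend)
def normalize_relationship_props_alt_step
    (st : List String × List Char × List Char) (ch : Char) :
    List String × List Char × List Char :=
  if ch = ',' then
    ((if st.2.1 ≠ [] then st.1 ++ [String.ofList st.2.1] else st.1), [], [])
  else if PySem.Chars.isspace ch then
    (st.1, st.2.1, if st.2.1 ≠ [] then st.2.2 ++ [ch] else st.2.2)
  else
    (st.1, st.2.1 ++ st.2.2 ++ [ch], [])

-- literal port of B: per raw, a char fold with state (out, tok, pend); commas emit tok,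
-- whitespace is buffered in pend (only while tok is non-empty), other chars commit pend
def normalize_relationship_props_py_alt (values : Option (List String)) : Option (List String) :=
  match values with
  | none => none
  | some vs =>
    if vs = [] then none
    else
      let out : List String := vs.foldl (fun out raw =>
        let st := raw.toList.foldl normalize_relationship_props_alt_step (out, [], [])
        if st.2.1 ≠ [] then st.1 ++ [String.ofList st.2.1] else st.1) []
      if out = [] then none else some out

-- ===== PRECONDITION & SPEC =====
def Spec_normalize_relationship_props_py (values : Option (List String)) (out : Option (List String)) : Prop := out = normalize_relationship_props_py_alt values
instance (values : Option (List String)) (out : Option (List String)) : Decidable (Spec_normalize_relationship_props_py values out) := by unfold Spec_normalize_relationship_props_py; infer_instance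

-- ===== CLAIM (what is proved, stated in full; the proofs are below) =====
def Claim_equal_normalize_relationship_props_py : Prop := ∀ (values : Option (List String)), Dom_normalize_relationship_props_py values → Spec_normalize_relationship_props_py values (normalize_relationship_props_py values)

-- ===== LEMMAS AND PROOFS =====

-- simple structural specification of splitting a char list on ','
def pvSplit (l : List Char) : List (List Char) :=
  match l with
  | [] => [[]]
  | x :: rest => if x = ',' then [] :: pvSplit rest else (pvSplit rest).modifyHead (x :: ·)

-- the stripped, non-empty parts of a list of segments
def pvStripParts (segs : List (List Char)) : List (List Char) :=
  (segs.map PySem.Chars.strip).filter (fun p => !p.isEmpty)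

theorem pvSplit_ne_nil (l : List Char) : pvSplit l ≠ [] := by
  induction l with
  | nil => simp [pvSplit]
  | cons x rest ih =>
    simp only [pvSplit]
    split
    · simp
    · cases h : pvSplit rest with
      | nil => exact absurd h ih
      | cons a t => simp

theorem splitOn_go_eq (fuel : Nat) (l cur : List Char) (acc : List (List Char))
    (h : l.length ≤ fuel) :
    PySem.Chars.splitOn.go [','] fuel l cur acc
      = acc.reverse ++ (pvSplit l).modifyHead (cur.reverse ++ ·) := by
  induction fuel generalizing l cur acc with
  | zero =>
    have : l = [] := List.eq_nil_of_length_eq_zero (Nat.le_zero.mp h)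
    subst this
    rw [PySem.Chars.splitOn.go.eq_def]
    simp [pvSplit]
  | succ fuel ih =>
    cases l with
    | nil =>
      rw [PySem.Chars.splitOn.go.eq_def]
      simp [pvSplit]
    | cons c rest =>
      rw [PySem.Chars.splitOn.go.eq_def]
      dsimp only
      simp only [List.length_cons] at h
      by_cases hc : c = ','
      · subst hc
        have hpre : [','].isPrefixOf (',' :: rest) = true := by
          show (',' == ',' && List.isPrefixOf [] rest) = true
          simp
        rw [if_pos hpre]
        show PySem.Chars.splitOn.go [','] fuel rest [] (cur.reverse :: acc) = _
        rw [ih rest [] (cur.reverse :: acc) (by omega)]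
        simp [pvSplit]
        cases pvSplit rest <;> simp [List.modifyHead]
      · have hpre : [','].isPrefixOf (c :: rest) = false := by
          show (',' == c && List.isPrefixOf [] rest) = false
          have h2 : (',' == c) = false := beq_eq_false_iff_ne.mpr (Ne.symm hc)
          simp [h2]
        rw [if_neg (by simp [hpre]), ih rest (c :: cur) acc (by omega)]
        simp only [pvSplit, if_neg hc]
        cases h : pvSplit rest with
        | nil => exact absurd h (pvSplit_ne_nil rest)
        | cons a t => simp

theorem splitOn_eq_pvSplit (l : List Char) :
    PySem.Chars.splitOn l [','] = pvSplit l := by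
  rw [PySem.Chars.splitOn, splitOn_go_eq _ _ _ _ (by omega)]
  cases h : pvSplit l with
  | nil => exact absurd h (pvSplit_ne_nil l)
  | cons a t => simp

-- the inner Python loop of A appends exactly the stripped non-empty parts
theorem inner_foldl_eq (parts : List (List Char)) (acc : List String) :
    parts.foldl (fun acc part =>
        let part := PySem.Chars.strip part
        if !part.isEmpty then acc ++ [String.ofList part] else acc) acc
      = acc ++ (pvStripParts parts).map String.ofList := by
  induction parts generalizing acc with
  | nil => simp [pvStripParts]
  | cons p rest ih =>
    simp only [List.foldl_cons, pvStripParts, List.map_cons, List.filter_cons]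
    split
    · rw [ih]
      simp [pvStripParts]
    · rw [ih]
      simp [pvStripParts]

-- A builds, per element, the stripped non-empty parts of its comma split
theorem a_foldl_eq (vs : List String) (acc : List String) :
    vs.foldl (fun acc raw =>
        (PySem.Chars.splitOn raw.toList [',']).foldl (fun acc part =>
          let part := PySem.Chars.strip part
          if !part.isEmpty then acc ++ [String.ofList part] else acc) acc) acc
      = acc ++ vs.flatMap (fun raw => (pvStripParts (pvSplit raw.toList)).map String.ofList) := by
  simp only [splitOn_eq_pvSplit, inner_foldl_eq]
  rw [PySem.List.foldl_append_eq_flatMap]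

-- B-side: the tokens the state machine emits from state (tok, pend) on input l
def pvScanTok (tok pend : List Char) : List Char → List (List Char)
  | [] => if tok ≠ [] then [tok] else []
  | c :: rest =>
    if c = ',' then (if tok ≠ [] then [tok] else []) ++ pvScanTok [] [] rest
    else if PySem.Chars.isspace c then
      pvScanTok tok (if tok ≠ [] then pend ++ [c] else pend) rest
    else pvScanTok (tok ++ pend ++ [c]) [] rest

-- B's char fold followed by the final flush emits pvScanTok, appended to out
theorem b_char_foldl_eq (l : List Char) (out : List String) (tok pend : List Char) :
    (let st := l.foldl normalize_relationship_props_alt_step (out, tok, pend)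
      if st.2.1 ≠ [] then st.1 ++ [String.ofList st.2.1] else st.1)
      = out ++ (pvScanTok tok pend l).map String.ofList := by
  induction l generalizing out tok pend with
  | nil =>
    simp only [List.foldl_nil, pvScanTok]
    split <;> simp_all
  | cons c rest ih =>
    simp only [List.foldl_cons, normalize_relationship_props_alt_step, pvScanTok]
    by_cases hc : c = ','
    · subst hc
      rw [if_pos rfl, if_pos rfl]
      rw [ih]
      by_cases h : tok = [] <;> simp [h]
    · rw [if_neg hc, if_neg hc]
      by_cases hs : PySem.Chars.isspace c
      · rw [if_pos hs, if_pos hs]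
        exact ih _ _ _
      · rw [if_neg hs, if_neg hs]
        exact ih _ _ _

-- strip of a token followed by buffered trailing whitespace is the token itself
theorem strip_tok_pend (tok pend : List Char)
    (hp : ∀ c ∈ pend, PySem.Chars.isspace c = true)
    (h0 : tok = [] → pend = [])
    (hh : ∀ x, tok.head? = some x → PySem.Chars.isspace x = false)
    (hl : ∀ x, tok.getLast? = some x → PySem.Chars.isspace x = false) :
    PySem.Chars.strip (tok ++ pend) = tok := by
  by_cases h : tok = []
  · subst h; rw [h0 rfl]; rfl
  · have hlstrip : PySem.Chars.lstrip (tok ++ pend) = tok ++ pend := by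
      unfold PySem.Chars.lstrip
      cases tok with
      | nil => exact absurd rfl h
      | cons a t =>
        have := hh a rfl
        simp [this]
    unfold PySem.Chars.strip PySem.Chars.rstrip
    rw [hlstrip, List.reverse_append]
    have hpend : pend.reverse.dropWhile PySem.Chars.isspace = [] := by
      rw [List.dropWhile_eq_nil_iff]
      intro x hx
      exact hp x (List.mem_reverse.mp hx)
    have htok : tok.reverse.dropWhile PySem.Chars.isspace = tok.reverse := by
      cases hr : tok.reverse with
      | nil => simp
      | cons b u =>
        have hb : tok.getLast? = some b := by
          rw [← List.head?_reverse, hr]; rfl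
        have := hl b hb
        simp [List.dropWhile, this]
    rw [List.dropWhile_append, hpend]
    simp [htok]

-- dropping a leading whitespace char does not change strip
theorem strip_cons_ws (c : Char) (s : List Char) (hs : PySem.Chars.isspace c = true) :
    PySem.Chars.strip (c :: s) = PySem.Chars.strip s := by
  unfold PySem.Chars.strip PySem.Chars.lstrip
  simp [List.dropWhile, hs]

-- the state machine emits exactly the stripped non-empty comma parts
theorem scanTok_eq (l : List Char) (tok pend : List Char)
    (hp : ∀ c ∈ pend, PySem.Chars.isspace c = true)
    (h0 : tok = [] → pend = [])
    (hh : ∀ x, tok.head? = some x → PySem.Chars.isspace x = false)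
    (hl : ∀ x, tok.getLast? = some x → PySem.Chars.isspace x = false) :
    pvScanTok tok pend l
      = pvStripParts ((tok ++ pend ++ (pvSplit l).headI) :: (pvSplit l).tail) := by
  induction l generalizing tok pend with
  | nil =>
    simp only [pvScanTok, pvSplit, List.headI, List.tail, List.append_nil]
    rw [pvStripParts, List.map_cons, List.map_nil, List.filter_cons]
    rw [strip_tok_pend tok pend hp h0 hh hl]
    split <;> simp_all
  | cons c rest ih =>
    simp only [pvScanTok, pvSplit]
    by_cases hc : c = ','
    · subst hc
      rw [if_pos rfl, if_pos rfl]
      rw [ih [] [] (by simp) (fun _ => rfl) (by intro x hx; simp at hx) (by intro x hx; simp at hx)]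
      simp only [List.nil_append, List.headI_cons, List.tail_cons]
      cases h : pvSplit rest with
      | nil => exact absurd h (pvSplit_ne_nil rest)
      | cons a t =>
        simp only [List.headI_cons, List.tail_cons]
        simp only [pvStripParts, List.map_cons, List.filter_cons, List.append_nil]
        rw [strip_tok_pend tok pend hp h0 hh hl]
        by_cases h : tok = [] <;> simp [h]
    · rw [if_neg hc, if_neg hc]
      by_cases hs : PySem.Chars.isspace c
      · rw [if_pos hs]
        have hpend' : ∀ x ∈ (if tok ≠ [] then pend ++ [c] else pend),
            PySem.Chars.isspace x = true := by
          split
          · intro x hx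
            rcases List.mem_append.mp hx with h1 | h1
            · exact hp x h1
            · simp at h1; subst h1; exact hs
          · exact hp
        have h0' : tok = [] → (if tok ≠ [] then pend ++ [c] else pend) = [] := by
          intro h; simp [h, h0 h]
        rw [ih tok _ hpend' h0' hh hl]
        cases h : pvSplit rest with
        | nil => exact absurd h (pvSplit_ne_nil rest)
        | cons a t =>
          simp only [List.modifyHead, List.headI_cons, List.tail_cons]
          simp only [pvStripParts, List.map_cons, List.filter_cons]
          by_cases h : tok = []
          · subst h
            rw [h0 rfl]
            simp only [ne_eq, not_true_eq_false, if_false, List.nil_append]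
            rw [strip_cons_ws c a hs]
          · rw [if_pos h]
            have : tok ++ (pend ++ [c]) ++ a = tok ++ pend ++ (c :: a) := by simp
            rw [this]
      · rw [if_neg hs]
        have hh' : ∀ x, (tok ++ pend ++ [c]).head? = some x →
            PySem.Chars.isspace x = false := by
          intro x hx
          by_cases h : tok = []
          · subst h
            rw [h0 rfl] at hx
            simp at hx
            subst hx
            simpa using hs
          · cases tok with
            | nil => exact absurd rfl h
            | cons a t =>
              simp only [List.cons_append, List.head?_cons, Option.some.injEq] at hx
              subst hx
              exact hh a rfl
        have hl' : ∀ x, (tok ++ pend ++ [c]).getLast? = some x →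
            PySem.Chars.isspace x = false := by
          intro x hx
          rw [List.getLast?_concat] at hx
          simp at hx
          subst hx
          simpa using hs
        rw [ih (tok ++ pend ++ [c]) [] (by simp) (by intro h; simp at h) hh' hl']
        cases h : pvSplit rest with
        | nil => exact absurd h (pvSplit_ne_nil rest)
        | cons a t =>
          simp only [List.modifyHead, List.headI_cons, List.tail_cons, List.append_nil]
          have : tok ++ pend ++ [c] ++ a = tok ++ pend ++ (c :: a) := by simp
          rw [this]

-- B's outer fold appends every string's tokens
theorem b_foldl_eq (vs : List String) (out : List String) :
    vs.foldl (fun out raw =>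
        let st := raw.toList.foldl normalize_relationship_props_alt_step (out, [], [])
        if st.2.1 ≠ [] then st.1 ++ [String.ofList st.2.1] else st.1) out
      = out ++ vs.flatMap (fun raw => (pvScanTok [] [] raw.toList).map String.ofList) := by
  induction vs generalizing out with
  | nil => simp
  | cons v rest ih =>
    simp only [List.foldl_cons, List.flatMap_cons]
    rw [b_char_foldl_eq, ih]
    simp

-- ===== VERDICT (by name: the statement is the Claim_ definition above) =====
theorem normalize_relationship_props_py_spec : Claim_equal_normalize_relationship_props_py := by
  intro values _
  unfold Spec_normalize_relationship_props_py
  match values with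
  | none => rfl
  | some vs =>
    by_cases hvs : vs = []
    · subst hvs; rfl
    · simp only [normalize_relationship_props_py, normalize_relationship_props_py_alt,
        if_neg hvs]
      rw [a_foldl_eq, b_foldl_eq]
      have : (fun raw => (pvScanTok [] [] raw.toList).map String.ofList)
          = (fun raw : String => (pvStripParts (pvSplit raw.toList)).map String.ofList) := by
        funext raw
        rw [scanTok_eq _ [] [] (by simp) (fun _ => rfl) (by intro x hx; simp at hx) (by intro x hx; simp at hx)]
        cases h : pvSplit raw.toList with
        | nil => exact absurd h (pvSplit_ne_nil raw.toList)
        | cons a t => simp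
      rw [this]
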